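-- pv_equiv track=rewrite | github.com/math4tots-misc/contest | tc/srm628div2/BishopMove/BishopMove.py | flood_fill
-- ===== SOURCE A (Python) =====
-- from collections import deque
--
-- def flood_fill(r,c):
-- 	board = {(r,c):-1 for r in range(8) for c in range(8)}
-- 	queue = deque([(r,c,0)])
-- 	while queue:
-- 		r, c, n = queue.popleft()
-- 		if r in range(8) and c in range(8) and board[r,c] == -1:
-- 			board[r,c] = n
-- 			for dr, dc in ((1,1),(-1,-1),(1,-1),(-1,1)):
-- 				for m in range(1,8):
-- 					queue.append((r+m*dr,c+m*dc,n+1))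
-- 	return board
-- ===== SOURCE B (Python) =====
-- def flood_fill(r, c):
--     # Closed-form classification instead of BFS: on an 8x8 board a bishop reaches
--     # a same-color square in at most 2 moves (1 if it shares a diagonal).
--     if not (0 <= r < 8 and 0 <= c < 8):
--         return {(i, j): -1 for i in range(8) for j in range(8)}
--     return {(i, j): (0 if (i, j) == (r, c)
--                      else -1 if (i + j) % 2 != (r + c) % 2
--                      else 1 if i - j == r - c or i + j == r + c
--                      else 2)
--             for i in range(8) for j in range(8)}
-- ===== Notes on version B (the rewrite author's own statement) =====
-- stated objective: simpler
-- what changed: Replaces the BFS flood fill with a dict comprehension assigning each of the 64 cells a distance by direct case analysis (0 at the start, -1 for the opposite colour, 1 on a shared diagonal, else 2); no queue or board mutation.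
import Mathlib
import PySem

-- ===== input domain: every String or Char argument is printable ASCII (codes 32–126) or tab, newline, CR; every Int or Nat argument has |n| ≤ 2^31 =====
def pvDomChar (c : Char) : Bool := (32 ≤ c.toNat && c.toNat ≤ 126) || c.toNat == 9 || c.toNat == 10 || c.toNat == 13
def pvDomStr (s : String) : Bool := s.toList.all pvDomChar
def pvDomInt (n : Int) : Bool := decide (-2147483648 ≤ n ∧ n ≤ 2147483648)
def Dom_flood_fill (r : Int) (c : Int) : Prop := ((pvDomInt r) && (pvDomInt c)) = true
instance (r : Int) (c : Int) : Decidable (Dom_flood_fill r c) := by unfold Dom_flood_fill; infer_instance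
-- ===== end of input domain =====

set_option maxRecDepth 100000
set_option maxHeartbeats 4000000


-- B replaces the BFS flood fill with a direct case analysis per cell (same return value; objective: simpler).
-- ===== PORT A =====
-- board comprehension: all 64 keys (i,j) mapped to -1, in insertion order
def pvBoardInit : PySem.Dict (Int × Int) Int :=
  PySem.Dict.mk <| (PySem.List.pyRange 0 8 1).flatMap (fun i =>
    (PySem.List.pyRange 0 8 1).map (fun j => ((i, j), (-1 : Int))))

-- deque as the standard two-stack pair (front, reversed back); pvPop = popleft
def pvPop (front back : List (Int × Int × Int)) :
    Option ((Int × Int × Int) × List (Int × Int × Int) × List (Int × Int × Int)) :=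
  match front with
  | x :: f => some (x, f, back)
  | [] =>
    match back.reverse with
    | [] => none
    | x :: f => some (x, f, [])

def pvBfs : Nat → List (Int × Int × Int) → List (Int × Int × Int) → PySem.Dict (Int × Int) Int → PySem.Dict (Int × Int) Int
  | 0, _, _, board => board
  | fuel + 1, front, back, board =>
    match pvPop front back with
    | none => board
    | some ((r, c, n), front', back') =>
      if (0 ≤ r ∧ r < 8) ∧ (0 ≤ c ∧ c < 8) ∧ PySem.Dict.get? board (r, c) = some (-1) then
        let board' := PySem.Dict.insert board (r, c) n
        let back'' := [((1:Int),(1:Int)), (-1,-1), (1,-1), (-1,1)].foldl (fun q d =>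
          (PySem.List.pyRange 1 8 1).foldl (fun q m => (r + m * d.1, c + m * d.2, n + 1) :: q) q) back'
        pvBfs fuel front' back'' board'
      else
        pvBfs fuel front' back' board

def flood_fill (r : Int) (c : Int) : List (Int × Int × Int) :=
  (pvBfs 900 [(r, c, 0)] [] pvBoardInit).items.map (fun kv => (kv.1.1, kv.1.2, kv.2))

def flood_fill_alt (r : Int) (c : Int) : List (Int × Int × Int) :=
  if (0 ≤ r ∧ r < 8) ∧ (0 ≤ c ∧ c < 8) then
    (PySem.List.pyRange 0 8 1).flatMap (fun i =>
      (PySem.List.pyRange 0 8 1).map (fun j =>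
        (i, j,
          if i = r ∧ j = c then 0
          else if PySem.Int.mod (i + j) 2 ≠ PySem.Int.mod (r + c) 2 then -1
          else if i - j = r - c ∨ i + j = r + c then 1
          else 2)))
  else
    (PySem.List.pyRange 0 8 1).flatMap (fun i =>
      (PySem.List.pyRange 0 8 1).map (fun j => (i, j, (-1 : Int))))


-- ===== PRECONDITION & SPEC =====
def Spec_flood_fill (r : Int) (c : Int) (out : List (Int × Int × Int)) : Prop := out = flood_fill_alt r c
instance (r : Int) (c : Int) (out : List (Int × Int × Int)) : Decidable (Spec_flood_fill r c out) := by unfold Spec_flood_fill; infer_instance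

-- ===== CLAIM (what is proved, stated in full; the proofs are below) =====
def Claim_equal_flood_fill : Prop := ∀ (r : Int) (c : Int), Dom_flood_fill r c → Spec_flood_fill r c (flood_fill r c)

-- ===== LEMMAS AND PROOFS =====

-- off the board the BFS guard fails on the single queue entry, so A returns the all-(-1) board, as does B
lemma off_board (r c : Int) (h : ¬ ((0 ≤ r ∧ r < 8) ∧ (0 ≤ c ∧ c < 8))) :
    flood_fill r c = flood_fill_alt r c := by
  have h3 : ¬ ((0 ≤ r ∧ r < 8) ∧ (0 ≤ c ∧ c < 8) ∧ PySem.Dict.get? pvBoardInit (r, c) = some (-1)) :=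
    fun hc => h ⟨hc.1, hc.2.1⟩
  rw [flood_fill, flood_fill_alt, if_neg h,
      show (900 : Nat) = 899 + 1 from rfl, pvBfs]
  simp only [pvPop, if_neg h3]
  rw [show (899 : Nat) = 898 + 1 from rfl, pvBfs]
  decide

-- ===== VERDICT (by name: the statement is the Claim_ definition above) =====
set_option maxRecDepth 1000000 in
theorem flood_fill_spec : Claim_equal_flood_fill := by
  intro r c _
  unfold Spec_flood_fill
  by_cases h : (0 ≤ r ∧ r < 8) ∧ (0 ≤ c ∧ c < 8)
  · obtain ⟨⟨hr0, hr8⟩, hc0, hc8⟩ := h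
    interval_cases r <;> interval_cases c <;> decide
  · exact off_board r c h
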